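-- pv_equiv track=rewrite | github.com/PedroLucasMiguel/Probabilidade-e-estatistica | src/frequency_calculator.py | get_recommended_bucket_count_for_sample
-- ===== SOURCE A (Python) =====
-- def get_recommended_bucket_count_for_sample(sample: list[float]) -> int:
--     return_values = [
--         (20, 5),
--         (100, 7),
--         (200, 9),
--         (500, 11),
--         (1000, 15),
--         (5000, 21),
--         (10000, 31),
--     ]
--
--     for gatekeeper, return_value in return_values:
--         if len(sample) < gatekeeper:
--             return return_value
--
--     return 41  # default value
-- ===== SOURCE B (Python) =====
-- import bisect
--
-- _THRESHOLDS = [20, 100, 200, 500, 1000, 5000, 10000]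
-- _VALUES = [5, 7, 9, 11, 15, 21, 31]
--
-- def get_recommended_bucket_count_for_sample(sample: list[float]) -> int:
--     # binary search: index of the first threshold strictly greater than len(sample)
--     idx = bisect.bisect_right(_THRESHOLDS, len(sample))
--     return _VALUES[idx] if idx < len(_VALUES) else 41
-- ===== Notes on version B (the rewrite author's own statement) =====
-- stated objective: idiomatic
-- what changed: Replaced the linear scan over (threshold, value) pairs by a bisect_right binary search on the sorted threshold table followed by a single indexed lookup.
import Mathlib
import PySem

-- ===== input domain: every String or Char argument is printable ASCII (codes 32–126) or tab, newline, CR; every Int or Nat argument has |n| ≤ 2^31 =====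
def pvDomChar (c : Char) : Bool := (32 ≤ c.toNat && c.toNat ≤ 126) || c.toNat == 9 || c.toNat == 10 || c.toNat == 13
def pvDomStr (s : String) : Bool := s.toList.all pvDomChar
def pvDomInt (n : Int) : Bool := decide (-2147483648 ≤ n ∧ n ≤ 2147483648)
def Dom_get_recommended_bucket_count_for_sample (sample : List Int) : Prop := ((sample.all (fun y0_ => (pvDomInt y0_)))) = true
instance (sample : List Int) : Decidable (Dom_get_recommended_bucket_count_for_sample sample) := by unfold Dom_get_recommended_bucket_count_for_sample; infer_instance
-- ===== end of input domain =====

-- B replaces A's linear scan over (threshold, value) pairs by a bisect_right binary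
-- search on the sorted threshold table plus one indexed lookup (idiomatic, same cost here).

-- ===== PORT A =====
-- the for-loop over return_values: first pair whose gatekeeper exceeds len(sample), else 41
def pvScanA (n : Int) : List (Int × Int) → Int
  | [] => 41
  | (g, v) :: rest => if n < g then v else pvScanA n rest

def get_recommended_bucket_count_for_sample (sample : List Int) : Int :=
  pvScanA (sample.length : Int)
    [(20, 5), (100, 7), (200, 9), (500, 11), (1000, 15), (5000, 21), (10000, 31)]

-- ===== PORT B =====
-- bisect.bisect_right(xs, x) on the sorted thresholds table equals the number of
-- leading elements ≤ x; ported by that standard-library correspondence.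
def pvBisectRight (xs : List Int) (x : Int) : Nat :=
  (xs.takeWhile (fun t => t ≤ x)).length

def get_recommended_bucket_count_for_sample_alt (sample : List Int) : Int :=
  let idx := pvBisectRight [20, 100, 200, 500, 1000, 5000, 10000] (sample.length : Int)
  if idx < 7 then List.getD [5, 7, 9, 11, 15, 21, 31] idx 0 else 41

-- ===== PRECONDITION & SPEC =====
def Spec_get_recommended_bucket_count_for_sample (sample : List Int) (out : Int) : Prop := out = get_recommended_bucket_count_for_sample_alt sample
instance (sample : List Int) (out : Int) : Decidable (Spec_get_recommended_bucket_count_for_sample sample out) := by unfold Spec_get_recommended_bucket_count_for_sample; infer_instance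

-- ===== CLAIM (what is proved, stated in full; the proofs are below) =====
def Claim_equal_get_recommended_bucket_count_for_sample : Prop := ∀ (sample : List Int), Dom_get_recommended_bucket_count_for_sample sample → Spec_get_recommended_bucket_count_for_sample sample (get_recommended_bucket_count_for_sample sample)

-- ===== LEMMAS AND PROOFS =====

-- ===== VERDICT (by name: the statement is the Claim_ definition above) =====
theorem get_recommended_bucket_count_for_sample_spec : Claim_equal_get_recommended_bucket_count_for_sample := by
  intro sample _
  unfold Spec_get_recommended_bucket_count_for_sample get_recommended_bucket_count_for_sample
    get_recommended_bucket_count_for_sample_alt pvBisectRight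
  set n : Int := (sample.length : Int) with hn
  by_cases h1 : n < 20
  · simp [pvScanA, List.takeWhile, h1, not_le.mpr h1]
  by_cases h2 : n < 100
  · simp [pvScanA, List.takeWhile, h1, h2, not_lt.mp h1, not_le.mpr h2]
  by_cases h3 : n < 200
  · simp [pvScanA, List.takeWhile, h1, h2, h3, not_lt.mp h1, not_lt.mp h2, not_le.mpr h3]
  by_cases h4 : n < 500
  · simp [pvScanA, List.takeWhile, h1, h2, h3, h4, not_lt.mp h1, not_lt.mp h2, not_lt.mp h3,
      not_le.mpr h4]
  by_cases h5 : n < 1000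
  · simp [pvScanA, List.takeWhile, h1, h2, h3, h4, h5, not_lt.mp h1, not_lt.mp h2, not_lt.mp h3,
      not_lt.mp h4, not_le.mpr h5]
  by_cases h6 : n < 5000
  · simp [pvScanA, List.takeWhile, h1, h2, h3, h4, h5, h6, not_lt.mp h1, not_lt.mp h2,
      not_lt.mp h3, not_lt.mp h4, not_lt.mp h5, not_le.mpr h6]
  by_cases h7 : n < 10000
  · simp [pvScanA, List.takeWhile, h1, h2, h3, h4, h5, h6, h7, not_lt.mp h1, not_lt.mp h2,
      not_lt.mp h3, not_lt.mp h4, not_lt.mp h5, not_lt.mp h6, not_le.mpr h7]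
  · simp [pvScanA, List.takeWhile, h1, h2, h3, h4, h5, h6, h7, not_lt.mp h1, not_lt.mp h2,
      not_lt.mp h3, not_lt.mp h4, not_lt.mp h5, not_lt.mp h6, not_lt.mp h7]
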